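-- pv_equiv track=rewrite | github.com/AiNakow/enako-bot | nonebot/src/plugins/nonebot-plugin-mahjong-assist/postprocess.py | tokens_to_tenhou_string
-- ===== SOURCE A (Python) =====
-- from typing import List, Optional, Tuple
--
-- def tokens_to_tenhou_string(tokens: List[str]) -> str:
--     if not tokens:
--         return ""
--     out = []
--     run_digits = ""
--     run_suit = None
--     for t in tokens:
--         d, s = t[0], t[1]
--         if run_suit is None:
--             run_suit = s
--             run_digits = d
--         elif s == run_suit:
--             run_digits += d
--         else:
--             out.append(run_digits + run_suit)
--             run_suit = s
--             run_digits = d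
--     out.append(run_digits + run_suit)
--     return "".join(out)
-- ===== SOURCE B (Python) =====
-- def tokens_to_tenhou_string(tokens):
--     # Recursive head-span decomposition: find the maximal prefix sharing the
--     # first token's suit, render it, then recurse on the remainder.
--     if not tokens:
--         return ""
--     suit = tokens[0][1]
--     i = 1
--     while i < len(tokens) and tokens[i][1] == suit:
--         i += 1
--     return "".join(t[0] for t in tokens[:i]) + suit + tokens_to_tenhou_string(tokens[i:])
-- ===== Notes on version B (the rewrite author's own statement) =====
-- stated objective: alternative
-- what changed: Replaces A's iterative run_digits/run_suit state machine with post-loop flush by a recursive head-span decomposition: find the maximal prefix sharing the first token's suit with an index scan, render that slice, and recurse on the remainder.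
import Mathlib
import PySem

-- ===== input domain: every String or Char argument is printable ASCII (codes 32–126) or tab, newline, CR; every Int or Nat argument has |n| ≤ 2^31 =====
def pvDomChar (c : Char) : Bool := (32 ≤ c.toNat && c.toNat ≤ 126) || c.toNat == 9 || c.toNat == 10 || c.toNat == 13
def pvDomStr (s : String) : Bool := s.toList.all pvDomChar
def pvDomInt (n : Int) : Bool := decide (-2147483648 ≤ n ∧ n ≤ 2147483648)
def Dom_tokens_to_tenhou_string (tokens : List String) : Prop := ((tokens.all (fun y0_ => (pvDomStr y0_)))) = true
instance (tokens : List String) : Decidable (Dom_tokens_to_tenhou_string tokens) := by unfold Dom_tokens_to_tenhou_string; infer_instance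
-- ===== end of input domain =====

-- B replaces A's iterative run-state machine (with post-loop flush) by a recursive
-- head-span decomposition: render the maximal same-suit prefix, recurse on the rest.


-- ===== PORT A =====
-- t[0] / t[1]; total via getD — Pre_ guarantees the index is in range (Python raises otherwise)
def pvDigit (t : String) : Char := (PySem.Str.pyGet? t 0).getD ' '
def pvSuit (t : String) : Char := (PySem.Str.pyGet? t 1).getD ' '

-- the for-loop of A over state (out, run_digits, run_suit); the [] case is the
-- post-loop flush out.append(run_digits + run_suit) + "".join(out)
def pvLoopA : List String → List (List Char) → List Char → Option Char → String
  | [], out, rd, rs => String.ofList (PySem.Chars.join [] (out ++ [rd ++ rs.elim [] (fun c => [c])]))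
  | t :: ts, out, rd, rs =>
      let d := pvDigit t
      let s := pvSuit t
      match rs with
      | none => pvLoopA ts out [d] (some s)
      | some k =>
        if s = k then pvLoopA ts out (rd ++ [d]) (some k)
        else pvLoopA ts (out ++ [rd ++ [k]]) [d] (some s)

def tokens_to_tenhou_string (tokens : List String) : String :=
  if tokens = [] then "" else pvLoopA tokens [] [] none

-- ===== PORT B =====
-- the while loop 'i = 1; while i < len(tokens) and tokens[i][1] == suit: i += 1':
-- pvRunLen counts the matching steps over the tail, so i = 1 + pvRunLen suit ts
def pvRunLen (k : Char) : List String → Nat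
  | [] => 0
  | t :: ts => if pvSuit t = k then 1 + pvRunLen k ts else 0

-- ''.join(t[0] for t in tokens[:i]) + suit + tokens_to_tenhou_string(tokens[i:])
-- (tokens[:i] / tokens[i:] with 0 ≤ i ≤ len are List.take / List.drop)
def tokens_to_tenhou_string_alt (tokens : List String) : String :=
  match tokens with
  | [] => ""
  | t :: ts =>
      let k := pvSuit t
      let i := 1 + pvRunLen k ts
      String.ofList (PySem.Chars.join [] (((t :: ts).take i).map (fun u => [pvDigit u])) ++ [k])
        ++ tokens_to_tenhou_string_alt ((t :: ts).drop i)
termination_by tokens.length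
decreasing_by
  simp only [List.length_drop, List.length_cons]
  omega

-- ===== PRECONDITION & SPEC =====
-- Pre_: every token has at least 2 characters (t[0]/t[1] raise IndexError otherwise, in both A and B)
def Pre_tokens_to_tenhou_string (tokens : List String) : Prop :=
  ∀ t ∈ tokens, 2 ≤ t.toList.length
instance (tokens : List String) : Decidable (Pre_tokens_to_tenhou_string tokens) := by
  unfold Pre_tokens_to_tenhou_string; infer_instance

def pvWitness_tokens_to_tenhou_string : List String := ["1m", "2m", "3p"]

def Spec_tokens_to_tenhou_string (tokens : List String) (out : String) : Prop := out = tokens_to_tenhou_string_alt tokens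
instance (tokens : List String) (out : String) : Decidable (Spec_tokens_to_tenhou_string tokens out) := by unfold Spec_tokens_to_tenhou_string; infer_instance

-- ===== CLAIM (what is proved, stated in full; the proofs are below) =====
def Claim_equal_tokens_to_tenhou_string : Prop := ∀ (tokens : List String), Dom_tokens_to_tenhou_string tokens → Pre_tokens_to_tenhou_string tokens → Spec_tokens_to_tenhou_string tokens (tokens_to_tenhou_string tokens)

-- ===== LEMMAS AND PROOFS =====

theorem pvSplit (A B : String) (x : List Char) (k : Char) (r : String) :
    A ++ (B ++ String.ofList (k :: x)) ++ r =
      A ++ (B ++ String.ofList [k]) ++ (String.ofList x ++ r) := by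
  have h : String.ofList (k :: x) = String.ofList [k] ++ String.ofList x := by
    rw [← String.ofList_append]; rfl
  rw [h]
  simp [String.append_assoc]

theorem pvJoin_nil_flatten : ∀ parts : List (List Char), PySem.Chars.join [] parts = parts.flatten := by
  intro parts
  induction parts with
  | nil => rfl
  | cons p ps ih =>
      cases ps with
      | nil => simp [PySem.Chars.join_singleton]
      | cons q qs =>
          rw [PySem.Chars.join_cons_cons]
          simp only [List.flatten_cons] at *
          rw [ih]; simp

-- A's loop, from a running group (rd, k) on, equals the current group extended by the
-- maximal same-suit run of ts, followed by B's rendering of the remainder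
theorem pvLoopA_eq (ts : List String) : ∀ (out : List (List Char)) (rd : List Char) (k : Char),
    pvLoopA ts out rd (some k) =
      String.ofList (out.flatten ++ rd
          ++ ((ts.take (pvRunLen k ts)).map (fun u => [pvDigit u])).flatten ++ [k])
        ++ tokens_to_tenhou_string_alt (ts.drop (pvRunLen k ts)) := by
  induction ts with
  | nil =>
      intro out rd k
      simp [pvLoopA, pvRunLen, tokens_to_tenhou_string_alt.eq_def, pvJoin_nil_flatten]
  | cons t ts ih =>
      intro out rd k
      by_cases h : pvSuit t = k
      · simp only [pvLoopA, pvRunLen, h]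
        rw [ih]
        simp [Nat.add_comm 1, List.map_take]
      · simp only [pvLoopA, pvRunLen, h, if_false]
        rw [ih]
        conv_rhs => rw [tokens_to_tenhou_string_alt.eq_def]
        simp [pvJoin_nil_flatten, Nat.add_comm 1, List.map_take]
        exact pvSplit _ _ _ _ _

-- ===== VERDICT (by name: the statement is the Claim_ definition above) =====
theorem tokens_to_tenhou_string_spec : Claim_equal_tokens_to_tenhou_string := by
  intro tokens _ _
  unfold Spec_tokens_to_tenhou_string
  cases tokens with
  | nil => simp [tokens_to_tenhou_string, tokens_to_tenhou_string_alt]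
  | cons t ts =>
      show pvLoopA (t :: ts) [] [] none = _
      simp only [pvLoopA]
      rw [pvLoopA_eq]
      conv_rhs => rw [tokens_to_tenhou_string_alt.eq_def]
      simp [pvJoin_nil_flatten, Nat.add_comm 1, List.map_take]
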